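-- pv_equiv track=rewrite | github.com/EricHeGitHub/python-predicting-stress-in-english-words | methods.py | VC_search
-- ===== SOURCE A (Python) =====
-- def count_vowel_number(word):
--     number = 0
--     for pronunciation in word:
--         if isVowel(pronunciation) ==1:
--             number +=1
--     return number
--
-- def VC_search(pronunciations):
--     vowel_count = 0
--     number = count_vowel_number(pronunciations)
--     VC_string = ''
--     following_c = ''
--     for pronunciation_index in range(len(pronunciations)):
--         if isVowel(pronunciations[pronunciation_index]) == 1:
--             vowel_count +=1
--             if vowel_count == number:
--                 last_vowel = pronunciations[pronunciation_index]
--                 if pronunciation_index == len(pronunciations) -1: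
--                     following_c = ''
--                 else:
--                     following_c = pronunciations[pronunciation_index+1]
--                 VC_string = last_vowel + following_c
--     return VC_string
--
-- def isVowel(pronunciation):
--     vowel = ['AA','AE','AH', 'AO', 'AW', 'AY', 'EH', 'ER','EY', 'IH','IY','OW','OY','UH', 'UW']
--     if pronunciation in vowel:
--         return 1
--     return 0
-- ===== SOURCE B (Python) =====
-- def isVowel(pronunciation):
--     vowel = ['AA','AE','AH', 'AO', 'AW', 'AY', 'EH', 'ER','EY', 'IH','IY','OW','OY','UH', 'UW']
--     if pronunciation in vowel:
--         return 1
--     return 0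
--
-- def VC_search(pronunciations):
--     # single backward scan: the first vowel found from the end is the last vowel
--     for i in range(len(pronunciations) - 1, -1, -1):
--         if isVowel(pronunciations[i]) == 1:
--             following = pronunciations[i + 1] if i < len(pronunciations) - 1 else ''
--             return pronunciations[i] + following
--     return ''
-- ===== Notes on version B (the rewrite author's own statement) =====
-- stated objective: simpler
-- what changed: Replaced the two-pass scheme (count all vowels, then forward-scan with a counter until the count is reached) by a single backward scan that returns at the first vowel found from the end.
import Mathlib
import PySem

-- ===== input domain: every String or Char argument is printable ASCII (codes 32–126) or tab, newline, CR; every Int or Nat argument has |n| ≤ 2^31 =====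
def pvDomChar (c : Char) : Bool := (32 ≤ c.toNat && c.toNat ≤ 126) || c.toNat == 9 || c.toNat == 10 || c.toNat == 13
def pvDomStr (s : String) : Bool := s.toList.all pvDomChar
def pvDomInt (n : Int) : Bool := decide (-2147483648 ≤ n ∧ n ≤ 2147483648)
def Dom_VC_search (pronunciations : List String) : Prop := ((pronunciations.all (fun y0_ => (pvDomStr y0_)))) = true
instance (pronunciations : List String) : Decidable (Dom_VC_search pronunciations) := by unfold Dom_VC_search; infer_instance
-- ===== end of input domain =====

-- B replaces A's two forward passes (count all vowels, then scan with a counter) by one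
-- backward scan that stops at the first vowel found from the end (simpler, measured faster).

-- ===== PORT A =====
def isVowel (pronunciation : String) : Int :=
  let vowel : List String := ["AA","AE","AH","AO","AW","AY","EH","ER","EY","IH","IY","OW","OY","UH","UW"]
  if vowel.contains pronunciation then 1 else 0

def count_vowel_number (word : List String) : Int :=
  word.foldl (fun number pronunciation =>
    if isVowel pronunciation == 1 then number + 1 else number) 0

-- loop body of A's for-loop, named (state = (vowel_count, VC_string, following_c))
def VC_loop (pronunciations : List String) (number : Int)
    (s : Int × String × String) (pronunciation_index : Int) : Int × String × String :=
  if isVowel (PySem.List.pyGetD pronunciations pronunciation_index "") == 1 then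
    let vowel_count := s.1 + 1
    if vowel_count == number then
      let last_vowel := PySem.List.pyGetD pronunciations pronunciation_index ""
      let following_c :=
        if pronunciation_index == PySem.List.len pronunciations - 1 then ""
        else PySem.List.pyGetD pronunciations (pronunciation_index + 1) ""
      (vowel_count, last_vowel ++ following_c, following_c)
    else (vowel_count, s.2.1, s.2.2)
  else s

def VC_search (pronunciations : List String) : String :=
  let number := count_vowel_number pronunciations
  ((PySem.List.pyRange 0 (PySem.List.len pronunciations) 1).foldl
      (VC_loop pronunciations number) (0, "", "")).2.1

-- ===== PORT B =====
-- backward scan: index i runs len-1, len-2, …, 0; return at the first vowel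
def VC_down (pronunciations : List String) : Nat → String
  | 0 => ""
  | i + 1 =>
      if isVowel (pronunciations.getD i "") == 1 then
        pronunciations.getD i "" ++
          (if i + 1 < pronunciations.length then pronunciations.getD (i + 1) "" else "")
      else VC_down pronunciations i

def VC_search_alt (pronunciations : List String) : String :=
  VC_down pronunciations pronunciations.length

-- ===== PRECONDITION & SPEC =====
def Spec_VC_search (pronunciations : List String) (out : String) : Prop := out = VC_search_alt pronunciations
instance (pronunciations : List String) (out : String) : Decidable (Spec_VC_search pronunciations out) := by unfold Spec_VC_search; infer_instance

-- ===== CLAIM (what is proved, stated in full; the proofs are below) =====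
def Claim_equal_VC_search : Prop := ∀ (pronunciations : List String), Dom_VC_search pronunciations → Spec_VC_search pronunciations (VC_search pronunciations)

-- ===== LEMMAS AND PROOFS =====

-- the vowel test as a Bool predicate
def Vb (p : String) : Bool := isVowel p == 1

lemma count_eq (ws : List String) :
    count_vowel_number ws = (ws.countP Vb : Int) := by
  unfold count_vowel_number
  simpa [Vb] using PySem.List.foldl_count_if Vb ws 0

-- if no vowel occurs at an index ≥ b, the backward scan passes straight down to b
lemma down_skip (ps : List String) (b i : Nat) (hb : b ≤ i) (hi : i ≤ ps.length)
    (hnov : ¬ (ps.drop b).any Vb) : VC_down ps i = VC_down ps b := by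
  induction i with
  | zero => cases Nat.le_zero.mp hb; rfl
  | succ i ih =>
    rcases Nat.lt_or_ge b (i + 1) with hlt | hge
    · have hbi : b ≤ i := Nat.lt_succ_iff.mp hlt
      have hiL : i < ps.length := Nat.lt_of_lt_of_le (Nat.lt_succ_self i) hi
      have hmem : ps.getD i "" ∈ ps.drop b := by
        rw [List.getD_eq_getElem ps "" hiL]
        have : ps[i] = (ps.drop b)[i - b]'(by simp; omega) := by
          rw [List.getElem_drop]; congr 1; omega
        rw [this]; exact List.getElem_mem _
      have hnv : ¬ Vb (ps.getD i "") := by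
        simp only [List.any_eq_true, not_exists] at hnov
        intro hvb
        exact hnov (ps.getD i "") ⟨hmem, hvb⟩
      show VC_down ps (i + 1) = VC_down ps b
      rw [show VC_down ps (i + 1) = VC_down ps i from by
        simp only [VC_down]; simp [Vb] at hnv; simp [hnv]]
      exact ih hbi (Nat.le_of_lt hiL)
    · have : b = i + 1 := Nat.le_antisymm hb hge
      rw [this]

-- main invariant of A's forward fold
lemma foldA_main (ps : List String) (a : Nat) (h : a ≤ ps.length) (vs fc : String) :
    ((PySem.List.pyRange (a : Int) (PySem.List.len ps) 1).foldl
        (VC_loop ps ((ps.countP Vb : Int))) (((ps.take a).countP Vb : Int), vs, fc)).2.1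
      = if (ps.drop a).any Vb then VC_search_alt ps else vs := by
  rw [PySem.List.len_eq]
  suffices H : ∀ k a, ps.length - a = k → a ≤ ps.length → ∀ vs fc,
      ((PySem.List.pyRange (a : Int) ((ps.length : Int)) 1).foldl
        (VC_loop ps ((ps.countP Vb : Int))) (((ps.take a).countP Vb : Int), vs, fc)).2.1
      = if (ps.drop a).any Vb then VC_search_alt ps else vs from H _ a rfl h vs fc
  intro k
  induction k with
  | zero =>
    intro a hk ha vs fc
    have haL : a = ps.length := by omega
    subst haL
    rw [PySem.List.pyRange_one_eq_nil (by exact_mod_cast le_rfl)]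
    simp
  | succ k ih =>
    intro a hk ha vs fc
    have haL : a < ps.length := by omega
    rw [PySem.List.pyRange_one_cons (by exact_mod_cast haL), List.foldl_cons]
    have hg : ps.getD a "" = ps[a] := List.getD_eq_getElem ps "" haL
    have hdropa : ps.drop a = ps[a] :: ps.drop (a + 1) := (List.getElem_cons_drop haL).symm
    have hsplit : ps.countP Vb = (ps.take (a + 1)).countP Vb + (ps.drop (a + 1)).countP Vb := by
      conv_lhs => rw [← List.take_append_drop (a + 1) ps]
      rw [List.countP_append]
    have htake : (ps.take (a + 1)).countP Vb
        = (ps.take a).countP Vb + (if Vb ps[a] then 1 else 0) := by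
      rw [List.take_add_one, List.getElem?_eq_getElem haL, List.countP_append]
      simp [List.countP_cons]
    have hcast : ((a : Int) + 1) = ((a + 1 : Nat) : Int) := by push_cast; ring
    by_cases hV : Vb ps[a]
    · by_cases hc : (ps.drop (a + 1)).countP Vb = 0
      · -- a is the last vowel: the counter reaches the total here
        have hnov : ¬ (ps.drop (a + 1)).any Vb := by
          rw [List.countP_eq_zero] at hc
          simp only [List.any_eq_true, not_exists]
          rintro x ⟨hx, hvx⟩; exact hc x hx hvx
        have hbeq : ((((ps.take a).countP Vb : Int)) + 1 == ((ps.countP Vb : Int))) = true := by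
          rw [beq_iff_eq, hsplit, htake]; simp [hV, hc]
        have hfc : (if ((a : Int) == (ps.length : Int) - 1) then ""
              else PySem.List.pyGetD ps ((a : Int) + 1) "")
            = (if a + 1 < ps.length then ps.getD (a + 1) "" else "") := by
          by_cases hlast : a + 1 < ps.length
          · have hne : ¬ (((a : Int) == (ps.length : Int) - 1) = true) := by
              simp only [beq_iff_eq]; omega
            rw [if_neg hne, if_pos hlast, hcast, PySem.List.pyGetD_natCast]
          · have heq : (((a : Int) == (ps.length : Int) - 1) = true) := by
              simp only [beq_iff_eq]; omega
            rw [if_pos heq, if_neg hlast]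
        have hstate : VC_loop ps ((ps.countP Vb : Int)) (((ps.take a).countP Vb : Int), vs, fc) (a : Int)
            = (((ps.take (a + 1)).countP Vb : Int),
               ps[a] ++ (if a + 1 < ps.length then ps.getD (a + 1) "" else ""),
               (if a + 1 < ps.length then ps.getD (a + 1) "" else "")) := by
          have hV2 : (isVowel ps[a] == 1) = true := hV
          simp only [VC_loop, PySem.List.pyGetD_natCast, PySem.List.len_eq, hg, hV2, if_true,
            hbeq, Prod.mk.injEq]
          exact ⟨by rw [htake, if_pos hV]; push_cast; ring, congrArg (fun s => ps[a] ++ s) hfc, hfc⟩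
        have hany : (ps.drop a).any Vb = true :=
          List.any_eq_true.mpr ⟨ps[a], by rw [hdropa]; exact List.mem_cons_self, hV⟩
        rw [hstate, hcast, ih (a + 1) (by omega) (by omega) _ _, if_neg hnov, if_pos hany]
        unfold VC_search_alt
        rw [down_skip ps (a + 1) ps.length (by omega) le_rfl hnov]
        show _ = VC_down ps (a + 1)
        simp only [VC_down]
        have hV'' : (isVowel (ps.getD a "") == 1) = true := by rw [hg]; exact hV
        rw [hV'', if_pos rfl, hg]
      · -- more vowels follow: the counter has not reached the total yet
        have hsome : (ps.drop (a + 1)).any Vb := by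
          rcases List.countP_pos_iff.mp (Nat.pos_of_ne_zero hc) with ⟨x, hx, hvx⟩
          exact List.any_eq_true.mpr ⟨x, hx, hvx⟩
        have hbeq : ((((ps.take a).countP Vb : Int)) + 1 == ((ps.countP Vb : Int))) = false := by
          rw [beq_eq_false_iff_ne]; intro hEq
          rw [hsplit, htake, if_pos hV] at hEq
          push_cast at hEq
          omega
        have hstate : VC_loop ps ((ps.countP Vb : Int)) (((ps.take a).countP Vb : Int), vs, fc) (a : Int)
            = (((ps.take (a + 1)).countP Vb : Int), vs, fc) := by
          have hV2 : (isVowel ps[a] == 1) = true := hV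
          simp only [VC_loop, PySem.List.pyGetD_natCast, hg, hV2, if_true, hbeq,
            Bool.false_eq_true, if_false, Prod.mk.injEq]
          exact ⟨by rw [htake, if_pos hV]; push_cast; ring, trivial⟩
        have hany : (ps.drop a).any Vb = true := by
          rcases List.any_eq_true.mp hsome with ⟨x, hx, hvx⟩
          exact List.any_eq_true.mpr ⟨x, by rw [hdropa]; exact List.mem_cons_of_mem _ hx, hvx⟩
        rw [hstate, hcast, ih (a + 1) (by omega) (by omega) _ _, if_pos hsome, if_pos hany]
    · -- no vowel at a: the state passes through unchanged
      have hstate : VC_loop ps ((ps.countP Vb : Int)) (((ps.take a).countP Vb : Int), vs, fc) (a : Int)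
          = (((ps.take (a + 1)).countP Vb : Int), vs, fc) := by
        have hV2 : (isVowel ps[a] == 1) = false := by simpa [Vb] using hV
        simp only [VC_loop, PySem.List.pyGetD_natCast, hg, hV2, Bool.false_eq_true, if_false,
          Prod.mk.injEq]
        exact ⟨by rw [htake, if_neg hV]; push_cast; ring, trivial⟩
      have hVf : Vb ps[a] = false := by simpa using hV
      have hiff : (ps.drop a).any Vb = (ps.drop (a + 1)).any Vb := by
        rw [hdropa, List.any_cons, hVf, Bool.false_or]
      rw [hstate, hcast, ih (a + 1) (by omega) (by omega) _ _, hiff]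

-- ===== VERDICT (by name: the statement is the Claim_ definition above) =====
theorem VC_search_spec : Claim_equal_VC_search := by
  intro ps _
  show VC_search ps = VC_search_alt ps
  have h := foldA_main ps 0 (Nat.zero_le _) "" ""
  simp only [List.take_zero, List.countP_nil, Nat.cast_zero, List.drop_zero] at h
  unfold VC_search
  rw [count_eq, h]
  by_cases hv : ps.any Vb
  · simp [hv]
  · simp [hv, VC_search_alt, down_skip ps 0 ps.length (Nat.zero_le _) le_rfl (by simpa using hv),
      VC_down]
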